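-- pv_equiv track=rewrite | github.com/zenithc-git/OKGraph | src/graph_eval/buffers.py | flatten_prompt_list
-- ===== SOURCE A (Python) =====
-- from typing import Dict, List, Sequence, Tuple
--
-- def flatten_prompt_list(prompts_by_class_id: Sequence[Sequence[str]]) -> Tuple[List[str], Dict[int, List[int]]]:
--     """Flatten per-class prompt lists into a single list and map class->indices."""
--     all_prompts: List[str] = []
--     class_prompt_map: Dict[int, List[int]] = {}
--
--     for class_id, prompts in enumerate(prompts_by_class_id):
--         if not prompts:
--             continue
--         start_idx = len(all_prompts)
--         all_prompts.extend(list(prompts))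
--         class_prompt_map[class_id] = list(range(start_idx, start_idx + len(prompts)))
--
--     return all_prompts, class_prompt_map
-- ===== SOURCE B (Python) =====
-- def flatten_prompt_list(prompts_by_class_id):
--     """Flatten per-class prompt lists into a single list and map class->indices."""
--     counts = [len(p) for p in prompts_by_class_id]
--     offsets = []
--     total = 0
--     for c in counts:
--         offsets.append(total)
--         total += c
--     all_prompts = [s for prompts in prompts_by_class_id for s in prompts]
--     class_prompt_map = {cid: list(range(off, off + c))
--                         for cid, (off, c) in enumerate(zip(offsets, counts))
--                         if c}
--     return all_prompts, class_prompt_map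
-- ===== Notes on version B (the rewrite author's own statement) =====
-- stated objective: alternative
-- what changed: Replaces A's single stateful loop (growing the output list and recording start indices as it goes) with a decoupled table-driven construction: a counts list, an exclusive prefix-sum offsets table, a flat comprehension for the prompts, and a separate comprehension over enumerate(zip(offsets, counts)) for the class->indices map.
import Mathlib
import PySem

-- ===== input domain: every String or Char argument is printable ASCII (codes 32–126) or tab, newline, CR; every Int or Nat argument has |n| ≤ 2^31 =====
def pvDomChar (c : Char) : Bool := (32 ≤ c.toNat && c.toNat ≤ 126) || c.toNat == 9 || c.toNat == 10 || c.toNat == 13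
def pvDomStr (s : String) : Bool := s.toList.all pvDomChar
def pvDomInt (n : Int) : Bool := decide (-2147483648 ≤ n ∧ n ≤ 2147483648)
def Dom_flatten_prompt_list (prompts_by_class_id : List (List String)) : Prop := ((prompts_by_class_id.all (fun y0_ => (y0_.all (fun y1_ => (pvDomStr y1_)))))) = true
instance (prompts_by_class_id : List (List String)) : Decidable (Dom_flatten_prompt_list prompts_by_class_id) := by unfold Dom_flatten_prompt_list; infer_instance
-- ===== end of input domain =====

-- B replaces A's single stateful loop by a precomputed count/offset table, a flat
-- comprehension for the prompts and a separate comprehension for the index map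
-- (objective: alternative decomposition, same cost).

-- ===== PORT A =====
-- one pass: for class_id, prompts in enumerate(...): skip empties, extend, record range
def flatten_prompt_list (prompts_by_class_id : List (List String)) : List String × (List (Int × List Int)) :=
  (PySem.List.enumerate prompts_by_class_id 0).foldl
    (fun (st : List String × List (Int × List Int)) p =>
      if p.2 = [] then st
      else
        let start_idx : Int := st.1.length
        (st.1 ++ p.2,
         st.2 ++ [(p.1, PySem.List.pyRange start_idx (start_idx + p.2.length) 1)]))
    ([], [])

-- ===== PORT B =====
-- counts, exclusive prefix-sum offsets, flat comprehension, then the map in one comprehension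
def flatten_prompt_list_alt (prompts_by_class_id : List (List String)) : List String × (List (Int × List Int)) :=
  let counts : List Int := prompts_by_class_id.map (fun p => (p.length : Int))
  let offsets : List Int :=
    (counts.foldl (fun (st : List Int × Int) c => (st.1 ++ [st.2], st.2 + c)) ([], 0)).1
  let all_prompts : List String := prompts_by_class_id.flatMap (fun prompts => prompts)
  let class_prompt_map : List (Int × List Int) :=
    ((PySem.List.enumerate (offsets.zip counts) 0).filter (fun p => p.2.2 != 0)).map
      (fun p => (p.1, PySem.List.pyRange p.2.1 (p.2.1 + p.2.2) 1))
  (all_prompts, class_prompt_map)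

-- ===== PRECONDITION & SPEC =====
def Spec_flatten_prompt_list (prompts_by_class_id : List (List String)) (out : List String × (List (Int × List Int))) : Prop := out = flatten_prompt_list_alt prompts_by_class_id
instance (prompts_by_class_id : List (List String)) (out : List String × (List (Int × List Int))) : Decidable (Spec_flatten_prompt_list prompts_by_class_id out) := by unfold Spec_flatten_prompt_list; infer_instance

-- ===== CLAIM (what is proved, stated in full; the proofs are below) =====
def Claim_equal_flatten_prompt_list : Prop := ∀ (prompts_by_class_id : List (List String)), Dom_flatten_prompt_list prompts_by_class_id → Spec_flatten_prompt_list prompts_by_class_id (flatten_prompt_list prompts_by_class_id)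

-- ===== LEMMAS AND PROOFS =====

-- common reference shape: the class→indices map built from class id s and offset t
def pvBuildMap (s t : Int) : List (List String) → List (Int × List Int)
  | [] => []
  | p :: rest =>
    if p = [] then pvBuildMap (s + 1) t rest
    else (s, PySem.List.pyRange t (t + p.length) 1) :: pvBuildMap (s + 1) (t + (p.length : Int)) rest

-- exclusive prefix sums starting at t
def pvOffs (t : Int) : List Int → List Int
  | [] => []
  | c :: cs => t :: pvOffs (t + c) cs

theorem pvLoopA (rest : List (List String)) : ∀ (s : Int) (acc : List String) (m : List (Int × List Int)),
    (PySem.List.enumerate rest s).foldl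
      (fun (st : List String × List (Int × List Int)) p =>
        if p.2 = [] then st
        else
          let start_idx : Int := st.1.length
          (st.1 ++ p.2,
           st.2 ++ [(p.1, PySem.List.pyRange start_idx (start_idx + p.2.length) 1)]))
      (acc, m)
    = (acc ++ rest.flatMap (fun prompts => prompts), m ++ pvBuildMap s (acc.length : Int) rest) := by
  induction rest with
  | nil => intro s acc m; simp [PySem.List.enumerate_nil, pvBuildMap]
  | cons p rest ih =>
    intro s acc m
    rw [PySem.List.enumerate_cons]
    by_cases hp : p = []
    · subst hp
      simp [pvBuildMap, ih]
    · simp only [List.foldl_cons, pvBuildMap, if_neg hp]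
      rw [ih]
      simp [List.append_assoc]

theorem pvOffsFold (cs : List Int) : ∀ (acc : List Int) (t : Int),
    cs.foldl (fun (st : List Int × Int) c => (st.1 ++ [st.2], st.2 + c)) (acc, t)
      = (acc ++ pvOffs t cs, t + cs.sum) := by
  induction cs with
  | nil => intro acc t; simp [pvOffs]
  | cons c cs ih => intro acc t; simp [pvOffs, ih, List.append_assoc]; ring

theorem pvLoopB (pbc : List (List String)) : ∀ (s t : Int),
    ((PySem.List.enumerate ((pvOffs t (pbc.map (fun p => (p.length : Int)))).zip
        (pbc.map (fun p => (p.length : Int)))) s).filter (fun p => p.2.2 != 0)).map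
      (fun p => (p.1, PySem.List.pyRange p.2.1 (p.2.1 + p.2.2) 1))
    = pvBuildMap s t pbc := by
  induction pbc with
  | nil => intro s t; simp [pvOffs, PySem.List.enumerate_nil, pvBuildMap]
  | cons p pbc ih =>
    intro s t
    simp only [List.map_cons, pvOffs, List.zip_cons_cons, PySem.List.enumerate_cons,
      List.filter_cons]
    by_cases hp : p = []
    · subst hp
      simp [pvBuildMap, ih]
    · have hlen : ((p.length : Int) != 0) = true := by
        simp [List.length_eq_zero_iff, hp]
      simp [hlen, pvBuildMap, if_neg hp, ih]

-- ===== VERDICT (by name: the statement is the Claim_ definition above) =====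
theorem flatten_prompt_list_spec : Claim_equal_flatten_prompt_list := by
  intro pbc _
  show flatten_prompt_list pbc = flatten_prompt_list_alt pbc
  unfold flatten_prompt_list flatten_prompt_list_alt
  rw [pvLoopA pbc 0 [] []]
  simp [pvOffsFold, pvLoopB]
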